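-- pv_equiv track=rewrite | github.com/ay27/GenderPrediction | fucking_python_map.py | _auto_split
-- ===== SOURCE A (Python) =====
-- import math
--
-- def _auto_split(length, count):
--     if count <= 0:
--         raise AttributeError('count must > 0 while count = %d' % count)
--     if length <= 0:
--         raise AttributeError('length must > 0 while length = %d' % length)
--     if length < count:
--         count = length
--     start = []
--     end = []
--     fr = int(math.ceil(length / float(count)))
--     tt = fr * count - length
--     pc = 0
--     for ii in range(count - tt):
--         start.append(pc)
--         pc += fr
--         end.append(pc)
--     fr -= 1
--     for ii in range(tt):
--         start.append(pc)
--         pc += fr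
--         end.append(pc)
--     end[-1] = length
--     return start, end
-- ===== SOURCE B (Python) =====
-- def _auto_split(length, count):
--     if count <= 0:
--         raise AttributeError('count must > 0 while count = %d' % count)
--     if length <= 0:
--         raise AttributeError('length must > 0 while length = %d' % length)
--     if length < count:
--         count = length
--     q, r = divmod(length, count)
--     bounds = [i * q + min(i, r) for i in range(count + 1)]
--     return bounds[:-1], bounds[1:]
-- ===== Notes on version B (the rewrite author's own statement) =====
-- stated objective: alternative
-- what changed: Replaces A's float-ceil division and two sequential accumulator loops (plus the end[-1] fixup) with integer divmod and a single closed-form boundary list bounds[i] = i*q + min(i, r), returning bounds[:-1] and bounds[1:].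
import Mathlib
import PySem

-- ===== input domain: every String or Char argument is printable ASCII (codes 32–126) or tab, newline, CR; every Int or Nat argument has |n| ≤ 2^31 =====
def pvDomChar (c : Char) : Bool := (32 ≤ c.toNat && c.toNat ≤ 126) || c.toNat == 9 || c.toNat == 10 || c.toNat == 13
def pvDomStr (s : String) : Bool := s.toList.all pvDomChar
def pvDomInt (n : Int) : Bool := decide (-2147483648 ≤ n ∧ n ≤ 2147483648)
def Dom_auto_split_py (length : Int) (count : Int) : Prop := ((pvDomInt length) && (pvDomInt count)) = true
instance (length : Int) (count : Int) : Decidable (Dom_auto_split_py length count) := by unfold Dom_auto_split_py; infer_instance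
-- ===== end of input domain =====

-- B replaces A's ceil-division two-phase accumulator loops by one divmod closed-form boundary list sliced twice (alternative decomposition).

-- ===== PORT A =====
-- loop body shared by A's two for-loops: append pc to start, advance pc by fr, append pc to end
def pvStepA (fr : Int) (st : List Int × List Int × Int) (_ii : Int) : List Int × List Int × Int :=
  (st.1 ++ [st.2.2], st.2.1 ++ [st.2.2 + fr], st.2.2 + fr)

def auto_split_py (length : Int) (count : Int) : List Int × List Int :=
  if count ≤ 0 then ([], [])        -- Python raises AttributeError here: excluded by Pre_
  else if length ≤ 0 then ([], [])  -- Python raises AttributeError here: excluded by Pre_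
  else
    let count := if length < count then length else count
    -- int(math.ceil(length / float(count))): exact ceiling division on Dom (|length| ≤ 2^31 < 2^53)
    let fr := -(PySem.Int.floordiv (-length) count)
    let tt := fr * count - length
    let s1 := (PySem.List.pyRange 0 (count - tt) 1).foldl (pvStepA fr) ([], [], 0)
    let s2 := (PySem.List.pyRange 0 tt 1).foldl (pvStepA (fr - 1)) s1
    (s2.1, s2.2.1.dropLast ++ [length])  -- end[-1] = length (end is nonempty on every Pre_ input)

-- ===== PORT B =====
def auto_split_py_alt (length : Int) (count : Int) : List Int × List Int :=
  if count ≤ 0 then ([], [])        -- Python raises AttributeError here: excluded by Pre_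
  else if length ≤ 0 then ([], [])  -- Python raises AttributeError here: excluded by Pre_
  else
    let count := if length < count then length else count
    let q := PySem.Int.floordiv length count
    let r := PySem.Int.mod length count
    let bounds := (PySem.List.pyRange 0 (count + 1) 1).map (fun i => i * q + min i r)
    (PySem.List.slice bounds none (some (-1)), PySem.List.slice bounds (some 1) none)

-- ===== PRECONDITION & SPEC =====
-- Pre_ excludes exactly the inputs on which A raises AttributeError (count ≤ 0 or length ≤ 0)
def Pre_auto_split_py (length : Int) (count : Int) : Prop := 0 < count ∧ 0 < length
instance (length : Int) (count : Int) : Decidable (Pre_auto_split_py length count) := by unfold Pre_auto_split_py; infer_instance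
def pvWitness_auto_split_py : Int × Int := (10, 3)

def Spec_auto_split_py (length : Int) (count : Int) (out : List Int × List Int) : Prop := out = auto_split_py_alt length count
instance (length : Int) (count : Int) (out : List Int × List Int) : Decidable (Spec_auto_split_py length count out) := by unfold Spec_auto_split_py; infer_instance

-- ===== CLAIM (what is proved, stated in full; the proofs are below) =====
def Claim_equal_auto_split_py : Prop := ∀ (length : Int) (count : Int), Dom_auto_split_py length count → Pre_auto_split_py length count → Spec_auto_split_py length count (auto_split_py length count)

-- ===== LEMMAS AND PROOFS =====

-- A's loop body ignores the loop variable: folding it over any list only depends on the length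
theorem foldA_closed (fr : Int) : ∀ (l : List Int) (s e : List Int) (pc : Int),
    l.foldl (pvStepA fr) (s, e, pc) =
      (s ++ (List.range l.length).map (fun (i : Nat) => pc + (i : Int) * fr),
       e ++ (List.range l.length).map (fun (i : Nat) => pc + ((i : Int) + 1) * fr),
       pc + (l.length : Int) * fr) := by
  intro l
  induction l with
  | nil => intro s e pc; simp
  | cons a l ih =>
      intro s e pc
      simp only [List.foldl_cons, pvStepA, ih, List.length_cons,
        List.range_succ_eq_map, List.map_cons, List.map_map, Prod.mk.injEq]
      refine ⟨?_, ?_, by push_cast; ring⟩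
      · simp only [List.append_assoc, List.cons_append, List.nil_append]
        congr 2
        · ring
        · apply List.map_congr_left; intro i _; simp [Function.comp]; ring
      · simp only [List.append_assoc, List.cons_append, List.nil_append]
        congr 2
        · ring
        · apply List.map_congr_left; intro i _; simp [Function.comp]; ring

-- B's boundary list over range(n+1), with the last element dropped / the first dropped
theorem boundsB_dropLast (f : Int → Int) (n : Nat) :
    (((List.range (n + 1)).map (fun (i : Nat) => f (i : Int)))).dropLast
      = (List.range n).map (fun (i : Nat) => f (i : Int)) := by
  rw [List.range_succ, List.map_append]
  simp

theorem boundsB_tail (f : Int → Int) (n : Nat) :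
    (((List.range (n + 1)).map (fun (i : Nat) => f (i : Int)))).tail
      = (List.range n).map (fun (i : Nat) => f ((i : Int) + 1)) := by
  rw [List.range_succ_eq_map]
  simp only [List.map_cons, List.tail_cons, List.map_map]
  apply List.map_congr_left; intro i _; simp [Function.comp]

-- ===== VERDICT (by name: the statement is the Claim_ definition above) =====
theorem auto_split_py_spec : Claim_equal_auto_split_py := by
  intro length count _hd hpre
  obtain ⟨hc0, hl0⟩ := hpre
  unfold Spec_auto_split_py auto_split_py auto_split_py_alt
  rw [if_neg (by omega : ¬ count ≤ 0), if_neg (by omega : ¬ length ≤ 0),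
      if_neg (by omega : ¬ count ≤ 0), if_neg (by omega : ¬ length ≤ 0)]
  dsimp only
  set c := if length < count then length else count with hcdef
  have hcpos : (0:ℤ) < c := by rw [hcdef]; split <;> omega
  have hcle : c ≤ length := by rw [hcdef]; split <;> omega
  have hqr := PySem.Int.floordiv_mul_add_mod length c
  have hr0 : 0 ≤ PySem.Int.mod length c := PySem.Int.mod_nonneg length hcpos
  have hrlt : PySem.Int.mod length c < c := PySem.Int.mod_lt length hcpos
  set q := PySem.Int.floordiv length c with hqdef
  set r := PySem.Int.mod length c with hrdef
  -- normalise B's side: pyRange → List.range, slices → dropLast/tail, then the two map lemmas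
  rw [PySem.List.slice_to_neg_one, PySem.List.slice_from_one, foldA_closed, foldA_closed]
  simp only [List.nil_append, PySem.List.pyRange_one, List.length_map, List.length_range,
    Int.sub_zero, List.map_map, Function.comp_def, zero_add, Prod.mk.injEq]
  have hct : (c + 1).toNat = c.toNat + 1 := by omega
  rw [hct, boundsB_dropLast (fun i => i * q + min i r) c.toNat,
      boundsB_tail (fun i => i * q + min i r) c.toNat]
  by_cases hr : r = 0
  · -- r = 0 : fr = q, tt = 0, one block of size c, each interval exactly q long
    have hfr : -(PySem.Int.floordiv (-length) c) = q := by
      rw [PySem.Int.neg_floordiv_neg_eq_iff_of_pos hcpos]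
      constructor <;> nlinarith [hqr]
    rw [hfr]
    have htt : q * c - length = 0 := by rw [← hqr, hr]; ring
    rw [htt]
    simp only [Int.sub_zero, Int.toNat_zero, List.range_zero, List.map_nil,
      List.append_nil]
    obtain ⟨M, hM⟩ : ∃ M, c.toNat = M + 1 := ⟨c.toNat - 1, by omega⟩
    constructor
    · apply List.map_congr_left
      intro i hi
      simp only [List.mem_range] at hi
      have hm : min ((i:ℤ)) r = 0 := by omega
      rw [hm]; ring
    · rw [hM, List.range_succ]
      simp only [List.map_append, List.map_cons, List.map_nil]
      rw [List.dropLast_concat]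
      congr 1
      · apply List.map_congr_left
        intro i hi
        simp only [List.mem_range] at hi
        have hm : min ((i:ℤ) + 1) r = 0 := by omega
        rw [hm]; ring
      · have hm : min ((M:ℤ) + 1) r = 0 := by omega
        rw [hm]
        have hmc : (M:ℤ) + 1 = c := by omega
        rw [hmc]
        have : c * q + 0 = length := by rw [← hqr, hr]; ring
        rw [this]
  · -- r > 0 : fr = q + 1, tt = c - r, first r intervals are one longer
    have hrpos : 0 < r := lt_of_le_of_ne hr0 (Ne.symm hr)
    have hfr : -(PySem.Int.floordiv (-length) c) = q + 1 := by
      rw [PySem.Int.neg_floordiv_neg_eq_iff_of_pos hcpos]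
      constructor <;> nlinarith [hqr]
    rw [hfr]
    have htt : c - ((q + 1) * c - length) = r := by rw [← hqr]; ring
    have htt2 : (q + 1) * c - length = c - r := by rw [← hqr]; ring
    rw [htt, htt2]
    have hrc : ((r.toNat : ℤ)) = r := Int.toNat_of_nonneg hr0
    have hsplit : c.toNat = r.toNat + (c - r).toNat := by omega
    rw [hsplit, List.range_add]
    obtain ⟨M, hM⟩ : ∃ M, (c - r).toNat = M + 1 := ⟨(c - r).toNat - 1, by omega⟩
    simp only [List.map_append, List.map_map]
    constructor
    · congr 1
      · apply List.map_congr_left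
        intro i hi
        simp only [List.mem_range] at hi
        have hm : min ((i:ℤ)) r = (i:ℤ) := by omega
        rw [hm]; ring
      · apply List.map_congr_left
        intro i hi
        simp only [List.mem_range] at hi
        simp only [Function.comp]
        have hm : min (((r.toNat + i : ℕ):ℤ)) r = r := by omega
        rw [hm]
        push_cast [hrc]
        ring
    · rw [hM, List.range_succ]
      simp only [List.map_append, List.map_cons, List.map_nil, ← List.append_assoc]
      rw [List.dropLast_concat]
      simp only [List.append_assoc]
      congr 1
      · apply List.map_congr_left
        intro i hi
        simp only [List.mem_range] at hi
        have hm : min ((i:ℤ) + 1) r = (i:ℤ) + 1 := by omega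
        rw [hm]; ring
      congr 1
      · apply List.map_congr_left
        intro i hi
        simp only [List.mem_range] at hi
        simp only [Function.comp]
        have hm : min (((r.toNat + i : ℕ):ℤ) + 1) r = r := by omega
        rw [hm]
        push_cast [hrc]
        ring
      · simp only [Function.comp]
        have hm : min (((r.toNat + M : ℕ):ℤ) + 1) r = r := by omega
        rw [hm]
        have hlast : (((r.toNat + M : ℕ):ℤ) + 1) * q + r = length := by
          have hMc : ((M:ℤ)) = c - r - 1 := by omega
          push_cast [hrc, hMc]
          nlinarith [hqr]
        rw [hlast]
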